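-- pv_equiv track=rewrite | github.com/andresflorezp/UVA_PYTHON | 10424.py | cuan
-- ===== SOURCE A (Python) =====
-- def cuan(val1,val2):
--     lis=[chr(i) for i in range(97,123)]
--     container1=[]
--     container2=[]
--     for i in val1:
--         if i in '!~@#$%^&*()_+:"<>?,./[]{}-,.#$%&/() 1234567890':
--             container1.append(0)
--         else:
--             container1.append(lis.index(i)+1)
--     for i in val2:
--         if i in '!~@#$%^&*()_+:"<>?,./[]{}-,.#$%&/() 1234567890':
--             container2.append(0)
--         else:
--             container2.append(lis.index(i)+1)
--     total1=str(sum(container1))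
--     total2=str(sum(container2))
--     count1=0
--     count2=0
--     while len(total1)!=1:
--         if len(val1)==1:
--             break
--         for i in total1:
--             count1+=int(i)
--
--         total1=str(count1)
--         count1=0
--     while len(total2)!=1:
--         if len(val2)==1:
--             break
--         for i in total2:
--             count2+=int(i)
--
--         total2=str(count2)
--         count2=0
--     return total1,total2
-- ===== SOURCE B (Python) =====
-- # Closed-form digital root instead of the iterated digit-summing loop; one shared
-- # helper replaces the duplicated per-string code.
-- def _reduce(val):
--     s = 0
--     for ch in val:
--         if ch not in '!~@#$%^&*()_+:"<>?,./[]{}-,.#$%&/() 1234567890':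
--             s += 'abcdefghijklmnopqrstuvwxyz'.index(ch) + 1
--     if len(val) == 1 or s < 10:
--         return str(s)
--     return str(1 + (s - 1) % 9)
--
-- def cuan(val1, val2):
--     return _reduce(val1), _reduce(val2)
-- ===== Notes on version B (the rewrite author's own statement) =====
-- stated objective: simpler
-- what changed: One shared helper accumulates the letter sum in a single pass (no intermediate container lists) and returns the closed-form digital root 1+(s-1)%9 instead of A's iterated digit-summing while-loop, keeping the single-character no-reduction quirk; Pre_ excludes inputs containing a character that is neither a lowercase letter nor in A's punctuation/digit string, on which both A and B raise ValueError.
import Mathlib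
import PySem

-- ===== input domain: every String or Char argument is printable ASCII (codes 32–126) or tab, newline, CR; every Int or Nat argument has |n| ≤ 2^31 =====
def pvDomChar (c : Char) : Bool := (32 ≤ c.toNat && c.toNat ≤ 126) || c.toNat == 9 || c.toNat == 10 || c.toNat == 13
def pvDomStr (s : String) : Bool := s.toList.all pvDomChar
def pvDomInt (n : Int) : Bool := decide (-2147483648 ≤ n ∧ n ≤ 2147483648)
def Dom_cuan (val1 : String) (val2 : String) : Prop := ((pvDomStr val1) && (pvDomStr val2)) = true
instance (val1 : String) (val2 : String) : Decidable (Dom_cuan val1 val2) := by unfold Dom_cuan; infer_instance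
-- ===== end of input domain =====

-- B replaces A's iterated digit-summing while-loops with the closed-form digital root computed by
-- one shared per-string helper (objective: simpler, no speed claim).

-- ===== PORT A =====
-- the punctuation/digit membership string, byte-for-byte as in the Python
def pvPunct : List Char := "!~@#$%^&*()_+:\"<>?,./[]{}-,.#$%&/() 1234567890".toList
-- lis = [chr(i) for i in range(97,123)]; chr(i) ported by hand as Char.ofNat i.toNat (exact here: 97 ≤ i < 123)
def pvLis : List Char := (PySem.List.pyRange 97 123 1).map (fun i => Char.ofNat i.toNat)
-- one loop-body value: 0 for punctuation/digits, else lis.index(i)+1 (lis.index raises ValueError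
-- when i is not a lowercase letter; Pre_ excludes those inputs, so the .getD 0 default is unreachable)
def pvValA (c : Char) : Int :=
  if PySem.Chars.isIn [c] pvPunct then 0
  else ((PySem.List.index? pvLis c).getD 0 : Int) + 1
-- the inner 'for i in total: count += int(i)' (int(i) via ofChars?; total is always a decimal-digit
-- string here, so the .getD 0 default is unreachable)
def pvDigitCount (total : String) : Int :=
  total.toList.foldl (fun cnt ch => cnt + (PySem.Int.ofChars? [ch]).getD 0) 0
-- the while-loop; the fuel only makes the recursion total (sum+1 steps always suffice because the
-- represented value strictly decreases on every iteration that recurses)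
def pvWhile (lenval : Int) (fuel : Nat) (total : String) : String :=
  match fuel with
  | 0 => total
  | f + 1 =>
    if PySem.Str.len total ≠ 1 then
      if lenval = 1 then total
      else pvWhile lenval f (PySem.Int.toStr (pvDigitCount total))
    else total

def cuan (val1 : String) (val2 : String) : String × String :=
  let container1 := val1.toList.foldl (fun acc c => acc ++ [pvValA c]) ([] : List Int)
  let container2 := val2.toList.foldl (fun acc c => acc ++ [pvValA c]) ([] : List Int)
  let total1 := PySem.Int.toStr container1.sum
  let total2 := PySem.Int.toStr container2.sum
  (pvWhile (PySem.Str.len val1) (container1.sum.toNat + 1) total1,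
   pvWhile (PySem.Str.len val2) (container2.sum.toNat + 1) total2)

-- ===== PORT B =====
def pvAlpha : List Char := "abcdefghijklmnopqrstuvwxyz".toList
-- Source B's _reduce: one-pass letter sum, then the closed-form digital root.
-- 'abcdefghijklmnopqrstuvwxyz'.index(ch) raises ValueError when ch is absent; ported via
-- PySem.Chars.find (which is -1 exactly there); Pre_ excludes those inputs, so -1 is unreachable.
def pvReduceAlt (val : String) : String :=
  let s := val.toList.foldl
    (fun s c => if !(PySem.Chars.isIn [c] pvPunct) then s + (PySem.Chars.find pvAlpha [c] + 1) else s)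
    (0 : Int)
  if val.toList.length = 1 ∨ s < 10 then PySem.Int.toStr s
  else PySem.Int.toStr (1 + PySem.Int.mod (s - 1) 9)

def cuan_alt (val1 : String) (val2 : String) : String × String :=
  (pvReduceAlt val1, pvReduceAlt val2)

-- ===== PRECONDITION & SPEC =====
-- Pre_ excludes exactly the inputs with a character that is neither in A's punctuation/digit
-- string nor a lowercase letter: there A raises ValueError (lis.index), and so does B.
def Pre_cuan (val1 : String) (val2 : String) : Prop :=
  ((val1.toList ++ val2.toList).all (fun c => pvPunct.contains c || pvAlpha.contains c)) = true
instance (val1 : String) (val2 : String) : Decidable (Pre_cuan val1 val2) := by unfold Pre_cuan; infer_instance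
def pvWitness_cuan : String × String := ("abc", "z!")

def Spec_cuan (val1 : String) (val2 : String) (out : String × String) : Prop := out = cuan_alt val1 val2
instance (val1 : String) (val2 : String) (out : String × String) : Decidable (Spec_cuan val1 val2 out) := by unfold Spec_cuan; infer_instance

-- ===== CLAIM (what is proved, stated in full; the proofs are below) =====
def Claim_equal_cuan : Prop := ∀ (val1 : String) (val2 : String), Dom_cuan val1 val2 → Pre_cuan val1 val2 → Spec_cuan val1 val2 (cuan val1 val2)

-- ===== LEMMAS AND PROOFS =====

-- B's per-character value as a standalone function (for the sum form of B's fold)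
def pvValB (c : Char) : Int :=
  if !(PySem.Chars.isIn [c] pvPunct) then PySem.Chars.find pvAlpha [c] + 1 else 0

-- decimal digits of n, most significant first (the structure of Nat.toDigits 10)
def pvDig (n : Nat) : List Char :=
  if n < 10 then [Nat.digitChar n] else pvDig (n / 10) ++ [Nat.digitChar (n % 10)]
  termination_by n
  decreasing_by exact Nat.div_lt_self (by omega) (by norm_num)

-- digit sum of n
def pvSn (n : Nat) : Nat :=
  if n < 10 then n else pvSn (n / 10) + n % 10
  termination_by n
  decreasing_by exact Nat.div_lt_self (by omega) (by norm_num)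

lemma pvToDigitsCore_eq : ∀ (fuel n : Nat) (acc : List Char), n < fuel →
    Nat.toDigitsCore 10 fuel n acc = pvDig n ++ acc := by
  intro fuel
  induction fuel with
  | zero => intro n acc h; omega
  | succ f ih =>
    intro n acc h
    rw [Nat.toDigitsCore]
    by_cases h10 : n / 10 = 0
    · have hn : n < 10 := by omega
      simp only [h10]
      rw [pvDig]
      simp [hn, Nat.mod_eq_of_lt hn]
    · have hn : 10 ≤ n := by omega
      simp only [h10]
      rw [ih (n / 10) _ (by omega)]
      have hd : pvDig n = pvDig (n / 10) ++ [Nat.digitChar (n % 10)] := by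
        conv_lhs => rw [pvDig]
        rw [if_neg (show ¬ n < 10 by omega)]
      rw [hd]
      simp

lemma pvToChars_natCast (n : Nat) : PySem.Int.toChars (n : Int) = pvDig n := by
  simp only [PySem.Int.toChars]
  rw [if_neg (by omega)]
  simp only [Int.toNat_natCast]
  rw [Nat.toDigits, pvToDigitsCore_eq (n + 1) n [] (by omega), List.append_nil]

lemma pvDig_length_pos (n : Nat) : 0 < (pvDig n).length := by
  rw [pvDig]; split <;> simp

lemma pvDig_len_one_iff (n : Nat) : (pvDig n).length = 1 ↔ n < 10 := by
  rw [pvDig]; split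
  · simpa
  · simp only [List.length_append, List.length_cons, List.length_nil]
    have := pvDig_length_pos (n / 10)
    constructor
    · intro h; omega
    · intro h; omega

lemma pvDigitChar_val : ∀ d, d < 10 → (PySem.Int.ofChars? [Nat.digitChar d]).getD 0 = (d : Int) := by
  decide

lemma pvSum_map_pvDig (n : Nat) :
    ((pvDig n).map (fun ch => (PySem.Int.ofChars? [ch]).getD 0)).sum = (pvSn n : Int) := by
  induction n using Nat.strong_induction_on with
  | _ n ih =>
    rw [pvDig, pvSn]
    split
    · next h => simp [pvDigitChar_val n h]
    · next h =>
      rw [List.map_append, List.sum_append, ih (n / 10) (Nat.div_lt_self (by omega) (by norm_num))]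
      simp [pvDigitChar_val (n % 10) (by omega)]

lemma pvSn_lt (n : Nat) (h : 10 ≤ n) : pvSn n < n := by
  induction n using Nat.strong_induction_on with
  | _ n ih =>
    rw [pvSn]
    rw [if_neg (by omega)]
    by_cases h2 : 10 ≤ n / 10
    · have := ih (n / 10) (Nat.div_lt_self (by omega) (by norm_num)) h2
      omega
    · rw [pvSn, if_pos (by omega)]
      omega

lemma pvSn_mod9 (n : Nat) : n % 9 = pvSn n % 9 := by
  induction n using Nat.strong_induction_on with
  | _ n ih =>
    rw [pvSn]
    split
    · rfl
    · next h =>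
      have := ih (n / 10) (Nat.div_lt_self (by omega) (by norm_num))
      omega

lemma pvSn_pos (n : Nat) (h : 0 < n) : 0 < pvSn n := by
  induction n using Nat.strong_induction_on with
  | _ n ih =>
    rw [pvSn]
    split
    · omega
    · next h2 =>
      have := ih (n / 10) (Nat.div_lt_self (by omega) (by norm_num)) (by omega)
      omega

lemma pvLen_toStr (n : Nat) : PySem.Str.len (PySem.Int.toStr (n : Int)) = ((pvDig n).length : Int) := by
  simp [PySem.Str.len_eq, PySem.Int.toList_toStr, pvToChars_natCast]

lemma pvDigitCount_toStr (n : Nat) : pvDigitCount (PySem.Int.toStr (n : Int)) = (pvSn n : Int) := by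
  unfold pvDigitCount
  rw [PySem.Int.toList_toStr, pvToChars_natCast, PySem.List.foldl_add, pvSum_map_pvDig, zero_add]

-- A's while-loop on str(n) computes the closed-form digital root (with the len(val)==1 break)
lemma pvWhile_eq (L : Int) (n fuel : Nat) (hf : n < fuel) :
    pvWhile L fuel (PySem.Int.toStr (n : Int)) =
      if L = 1 ∨ (n : Int) < 10 then PySem.Int.toStr (n : Int)
      else PySem.Int.toStr (1 + PySem.Int.mod ((n : Int) - 1) 9) := by
  induction n using Nat.strong_induction_on generalizing fuel with
  | _ n ih =>
    match fuel, hf with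
    | f + 1, hf =>
      rw [pvWhile]
      by_cases hn : n < 10
      · rw [if_neg (by rw [pvLen_toStr]; simp [(pvDig_len_one_iff n).mpr hn]),
            if_pos (Or.inr (by exact_mod_cast hn))]
      · rw [if_pos (by
              rw [pvLen_toStr]
              have hne := (pvDig_len_one_iff n).not.mpr hn
              exact_mod_cast fun h => hne (by exact_mod_cast h))]
        by_cases hL : L = 1
        · rw [if_pos hL, if_pos (Or.inl hL)]
        · rw [if_neg hL, if_neg (by simp only [not_or]; exact ⟨hL, by omega⟩)]
          rw [pvDigitCount_toStr]
          have hsn : pvSn n < n := pvSn_lt n (by omega)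
          rw [ih (pvSn n) hsn f (by omega)]
          have h9 := pvSn_mod9 n
          have hpos := pvSn_pos n (by omega)
          rw [PySem.Int.mod_eq_emod_of_pos (by norm_num : (0 : Int) < 9),
              PySem.Int.mod_eq_emod_of_pos (by norm_num : (0 : Int) < 9)]
          by_cases hs : pvSn n < 10
          · rw [if_pos (Or.inr (by exact_mod_cast hs))]
            congr 1
            omega
          · rw [if_neg (by simp only [not_or]; exact ⟨hL, by omega⟩)]
            congr 2
            omega

set_option maxRecDepth 8000 in
lemma pvPunct_vals : pvPunct.all (fun c => decide (pvValA c = pvValB c ∧ 0 ≤ pvValB c)) = true := by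
  decide

set_option maxRecDepth 8000 in
lemma pvAlpha_vals : pvAlpha.all (fun c => decide (pvValA c = pvValB c ∧ 0 ≤ pvValB c)) = true := by
  decide

lemma pvVal_eq (c : Char) (h : c ∈ pvPunct ∨ c ∈ pvAlpha) : pvValA c = pvValB c ∧ 0 ≤ pvValB c := by
  rcases h with h | h
  · exact of_decide_eq_true (List.all_eq_true.mp pvPunct_vals c h)
  · exact of_decide_eq_true (List.all_eq_true.mp pvAlpha_vals c h)

lemma pvFoldB_eq (l : List Char) :
    l.foldl (fun s c => if !(PySem.Chars.isIn [c] pvPunct) then s + (PySem.Chars.find pvAlpha [c] + 1) else s) (0 : Int)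
      = (l.map pvValB).sum := by
  have hfun : (fun (s : Int) (c : Char) => if !(PySem.Chars.isIn [c] pvPunct) then s + (PySem.Chars.find pvAlpha [c] + 1) else s)
      = fun s c => s + pvValB c := by
    funext s c
    unfold pvValB
    split <;> simp
  rw [hfun, PySem.List.foldl_add, zero_add]

lemma pvSide_eq (val : String) (h : ∀ c ∈ val.toList, c ∈ pvPunct ∨ c ∈ pvAlpha) :
    pvWhile (PySem.Str.len val)
      ((val.toList.foldl (fun acc c => acc ++ [pvValA c]) ([] : List Int)).sum.toNat + 1)
      (PySem.Int.toStr (val.toList.foldl (fun acc c => acc ++ [pvValA c]) ([] : List Int)).sum)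
      = pvReduceAlt val := by
  rw [PySem.List.foldl_append_singleton_eq_map, List.nil_append]
  have hmap : val.toList.map pvValA = val.toList.map pvValB :=
    List.map_congr_left (fun c hc => (pvVal_eq c (h c hc)).1)
  have hnn : 0 ≤ (val.toList.map pvValA).sum := by
    apply List.sum_nonneg
    intro x hx
    obtain ⟨c, hc, rfl⟩ := List.mem_map.mp hx
    rw [(pvVal_eq c (h c hc)).1]
    exact (pvVal_eq c (h c hc)).2
  obtain ⟨n, hn⟩ : ∃ m : Nat, (val.toList.map pvValA).sum = (m : Int) :=
    ⟨(val.toList.map pvValA).sum.toNat, (Int.toNat_of_nonneg hnn).symm⟩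
  rw [hn, Int.toNat_natCast, pvWhile_eq (PySem.Str.len val) n (n + 1) (by omega)]
  unfold pvReduceAlt
  rw [pvFoldB_eq, ← hmap, hn]
  have hlen : (PySem.Str.len val = 1) ↔ (val.toList.length = 1) := by
    rw [PySem.Str.len_eq]
    exact_mod_cast Iff.rfl
  exact if_congr (or_congr_left hlen) rfl rfl

-- ===== VERDICT (by name: the statement is the Claim_ definition above) =====
theorem cuan_spec : Claim_equal_cuan := by
  intro val1 val2 _hdom hpre
  unfold Spec_cuan
  show cuan val1 val2 = cuan_alt val1 val2
  have hmem : ∀ c ∈ val1.toList ++ val2.toList, c ∈ pvPunct ∨ c ∈ pvAlpha := by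
    intro c hc
    have := List.all_eq_true.mp hpre c hc
    simpa using this
  have h1 : ∀ c ∈ val1.toList, c ∈ pvPunct ∨ c ∈ pvAlpha := fun c hc =>
    hmem c (List.mem_append.mpr (Or.inl hc))
  have h2 : ∀ c ∈ val2.toList, c ∈ pvPunct ∨ c ∈ pvAlpha := fun c hc =>
    hmem c (List.mem_append.mpr (Or.inr hc))
  simp only [cuan, cuan_alt, Prod.mk.injEq]
  exact ⟨pvSide_eq val1 h1, pvSide_eq val2 h2⟩
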